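-- pv_equiv track=rewrite | github.com/Enielect/A2SV-problems | image-smoother.py | calculate
-- ===== SOURCE A (Python) =====
-- def calculate(i, j, width, height, img):
--     col_start, row_start = j - 1, i - 1
--     res, size = 0, 0
--     for i in range(row_start, row_start + 3):
--         for j in range(col_start, col_start + 3):
--             if i >= 0 and i < height and j >=0 and j < width:
--                 res += img[i][j]
--                 size += 1
--     return res // size
-- ===== SOURCE B (Python) =====
-- def calculate(i, j, width, height, img):
--     res, size = 0, 0
--     for r, row in enumerate(img):
--         if r < height and i - 1 <= r <= i + 1:
--             for c, v in enumerate(row):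
--                 if c < width and j - 1 <= c <= j + 1:
--                     res += v
--                     size += 1
--     return res // size
-- ===== Notes on version B (the rewrite author's own statement) =====
-- stated objective: alternative
-- what changed: B inverts the traversal: instead of generating the 9 window coordinates and probing the grid with bounds checks and indexing, it streams the image itself with enumerate (rows, then cells) and accumulates exactly the cells whose coordinates fall inside the window, never indexing img at all.
import Mathlib
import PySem

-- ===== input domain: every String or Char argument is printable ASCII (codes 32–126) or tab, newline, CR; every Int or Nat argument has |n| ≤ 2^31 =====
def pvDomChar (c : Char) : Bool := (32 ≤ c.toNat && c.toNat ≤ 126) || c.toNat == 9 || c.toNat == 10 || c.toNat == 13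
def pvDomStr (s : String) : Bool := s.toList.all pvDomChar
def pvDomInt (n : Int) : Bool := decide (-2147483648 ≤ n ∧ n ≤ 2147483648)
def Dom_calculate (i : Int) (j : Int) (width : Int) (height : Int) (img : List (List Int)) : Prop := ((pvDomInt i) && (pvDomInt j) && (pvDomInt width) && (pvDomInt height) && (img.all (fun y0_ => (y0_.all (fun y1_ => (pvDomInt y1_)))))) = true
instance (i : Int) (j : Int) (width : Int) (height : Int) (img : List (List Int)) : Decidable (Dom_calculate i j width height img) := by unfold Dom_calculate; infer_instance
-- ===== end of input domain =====

-- B inverts the traversal: instead of probing the 9 window coordinates against the grid, it streams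
-- the image itself with enumerate and accumulates the cells that fall inside the window (alternative; same result, no indexing).

-- ===== PORT A =====
def calculate (i : Int) (j : Int) (width : Int) (height : Int) (img : List (List Int)) : Int :=
  let colStart := j - 1
  let rowStart := i - 1
  let st :=
    (PySem.List.pyRange rowStart (rowStart + 3) 1).foldl (fun (st : Int × Int) r =>
      (PySem.List.pyRange colStart (colStart + 3) 1).foldl (fun (st : Int × Int) c =>
        if 0 ≤ r ∧ r < height ∧ 0 ≤ c ∧ c < width then
          (st.1 + PySem.List.pyGetD (PySem.List.pyGetD img r []) c 0, st.2 + 1)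
        else st) st) ((0 : Int), (0 : Int))
  PySem.Int.floordiv st.1 st.2

-- ===== PORT B =====
def calculate_alt (i : Int) (j : Int) (width : Int) (height : Int) (img : List (List Int)) : Int :=
  let st :=
    (PySem.List.enumerate img).foldl (fun (st : Int × Int) rrow =>
      if rrow.1 < height ∧ i - 1 ≤ rrow.1 ∧ rrow.1 ≤ i + 1 then
        (PySem.List.enumerate rrow.2).foldl (fun (st : Int × Int) cv =>
          if cv.1 < width ∧ j - 1 ≤ cv.1 ∧ cv.1 ≤ j + 1 then
            (st.1 + cv.2, st.2 + 1)
          else st) st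
      else st) ((0 : Int), (0 : Int))
  PySem.Int.floordiv st.1 st.2

-- ===== PRECONDITION & SPEC =====
-- Pre_ excludes exactly the inputs on which the Python A raises: an empty clamped window
-- (ZeroDivisionError) and a window cell outside the jagged grid (IndexError).
def Pre_calculate (i : Int) (j : Int) (width : Int) (height : Int) (img : List (List Int)) : Prop :=
  max 0 (i - 1) < min height (i + 2) ∧ max 0 (j - 1) < min width (j + 2) ∧
  ∀ r ∈ PySem.List.pyRange (max 0 (i - 1)) (min height (i + 2)) 1,
    r < (img.length : Int) ∧
    ∀ c ∈ PySem.List.pyRange (max 0 (j - 1)) (min width (j + 2)) 1,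
      c < ((PySem.List.pyGetD img r []).length : Int)
instance (i : Int) (j : Int) (width : Int) (height : Int) (img : List (List Int)) : Decidable (Pre_calculate i j width height img) := by unfold Pre_calculate; infer_instance

def pvWitness_calculate : Int × Int × Int × Int × List (List Int) := (1, 1, 3, 2, [[1, 2, 3], [4, 5, 6]])

def Spec_calculate (i : Int) (j : Int) (width : Int) (height : Int) (img : List (List Int)) (out : Int) : Prop := out = calculate_alt i j width height img
instance (i : Int) (j : Int) (width : Int) (height : Int) (img : List (List Int)) (out : Int) : Decidable (Spec_calculate i j width height img out) := by unfold Spec_calculate; infer_instance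

-- ===== CLAIM (what is proved, stated in full; the proofs are below) =====
def Claim_equal_calculate : Prop := ∀ (i : Int) (j : Int) (width : Int) (height : Int) (img : List (List Int)), Dom_calculate i j width height img → Pre_calculate i j width height img → Spec_calculate i j width height img (calculate i j width height img)

-- ===== LEMMAS AND PROOFS =====

-- the guarded (res, size) loop over a list computes a filtered sum and a filtered count
theorem pv_pairfold (l : List Int) (p : Int → Prop) [DecidablePred p] (f : Int → Int) (st : Int × Int) :
    l.foldl (fun st x => if p x then (st.1 + f x, st.2 + 1) else st) st
      = (st.1 + ((l.filter (fun x => decide (p x))).map f).sum,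
         st.2 + ((l.filter (fun x => decide (p x))).length : Int)) := by
  induction l generalizing st with
  | nil => simp
  | cons a t ih =>
    by_cases h : p a
    · simp [List.foldl_cons, h, ih, Prod.ext_iff]
      constructor <;> ring
    · simp [List.foldl_cons, h, ih]

-- an unguarded pair-accumulating loop adds componentwise
theorem pv_foldl_pair_add (l : List Int) (F N : Int → Int) (st : Int × Int) :
    l.foldl (fun st r => (st.1 + F r, st.2 + N r)) st
      = (st.1 + (l.map F).sum, st.2 + (l.map N).sum) := by
  induction l generalizing st with
  | nil => simp
  | cons a t ih => simp [List.foldl_cons, ih]; constructor <;> ring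

-- a guarded pair-accumulating loop adds over the filtered list
theorem pv_guard_pair_fold (l : List Int) (p : Int → Prop) [DecidablePred p] (F N : Int → Int) (st : Int × Int) :
    l.foldl (fun st r => if p r then (st.1 + F r, st.2 + N r) else st) st
      = (st.1 + ((l.filter (fun r => decide (p r))).map F).sum,
         st.2 + ((l.filter (fun r => decide (p r))).map N).sum) := by
  induction l generalizing st with
  | nil => simp
  | cons a t ih =>
    by_cases h : p a
    · simp [List.foldl_cons, h, ih, Prod.ext_iff]
      constructor <;> ring
    · simp [List.foldl_cons, h, ih]

-- clamping a unit-step range is filtering it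
theorem pv_pyRange_clamp (lo hi a b : Int) :
    PySem.List.pyRange (max lo a) (min hi b) 1
      = (PySem.List.pyRange a b 1).filter (fun x => decide (lo ≤ x ∧ x < hi)) := by
  induction hn : (b - a).toNat generalizing a with
  | zero =>
    have hab : b ≤ a := by omega
    rw [PySem.List.pyRange_one_eq_nil (by omega : min hi b ≤ max lo a),
        PySem.List.pyRange_one_eq_nil hab]
    simp
  | succ n ih =>
    have hab : a < b := by omega
    rw [PySem.List.pyRange_one_cons hab]
    by_cases hp : lo ≤ a ∧ a < hi
    · have h1 : max lo a = a := by omega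
      have h2 : a < min hi b := by omega
      have h3 : max lo (a + 1) = a + 1 := by omega
      have h4 := ih (a + 1) (by omega)
      rw [h3] at h4
      rw [h1, PySem.List.pyRange_one_cons h2, h4]
      simp [hp.1, hp.2]
    · by_cases hlo : a < lo
      · have h1 : max lo a = max lo (a + 1) := by omega
        rw [h1, ih (a + 1) (by omega)]
        simp [hp]
      · have hhi : hi ≤ a := by omega
        rw [PySem.List.pyRange_one_eq_nil (by omega : min hi b ≤ max lo a)]
        simp only [List.filter_cons, decide_eq_true_eq]
        rw [if_neg hp]
        symm
        rw [List.filter_eq_nil_iff]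
        intro x hx
        have := (PySem.List.mem_pyRange_one).mp hx
        simp only [decide_eq_true_eq]
        omega

-- a guarded sum is a sum over the filtered list
theorem pv_sum_map_ite (l : List Int) (p : Int → Prop) [DecidablePred p] (f : Int → Int) :
    (l.map (fun x => if p x then f x else 0)).sum
      = ((l.filter (fun x => decide (p x))).map f).sum := by
  induction l with
  | nil => simp
  | cons a t ih => by_cases h : p a <;> simp [h, ih]

-- a constant conjunct factors out of a filter
theorem pv_filter_const (l : List Int) (P Q : Prop) [Decidable P] [Decidable Q]
    (q : Int → Prop) [DecidablePred q] :
    l.filter (fun c => decide (P ∧ Q ∧ q c))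
      = if P ∧ Q then l.filter (fun c => decide (q c)) else [] := by
  by_cases h : P ∧ Q
  · simp only [if_pos h]
    apply List.filter_congr
    intro x _
    simp [h.1, h.2]
  · simp only [if_neg h]
    rw [List.filter_eq_nil_iff]
    intro x _
    simp only [decide_eq_true_eq]
    tauto

theorem pv_sum_map_const (l : List Int) (K : Int) :
    (l.map (fun _ => K)).sum = (l.length : Int) * K := by
  induction l with
  | nil => simp
  | cons a t ih =>
    rw [List.map_cons, List.sum_cons, ih, List.length_cons]
    push_cast
    ring

-- B's inner enumerate-loop is a filtered sum/count over the row's index range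
theorem pv_enum_pairfold (width j : Int) (row : List Int) (st : Int × Int) :
    (PySem.List.enumerate row).foldl (fun (st : Int × Int) cv =>
        if cv.1 < width ∧ j - 1 ≤ cv.1 ∧ cv.1 ≤ j + 1 then (st.1 + cv.2, st.2 + 1) else st) st
      = (st.1 + (((PySem.List.pyRange 0 (PySem.List.len row) 1).filter
            (fun c => decide (c < width ∧ j - 1 ≤ c ∧ c ≤ j + 1))).map
            (fun c => PySem.List.pyGetD row c 0)).sum,
         st.2 + (((PySem.List.pyRange 0 (PySem.List.len row) 1).filter
            (fun c => decide (c < width ∧ j - 1 ≤ c ∧ c ≤ j + 1))).length : Int)) := by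
  rw [PySem.List.enumerate_eq_map_pyRange row 0, List.foldl_map]
  exact pv_pairfold _ (fun c => c < width ∧ j - 1 ≤ c ∧ c ≤ j + 1) _ _

-- A reduced to the closed clamped-window form
theorem pv_A_closed (i j width height : Int) (img : List (List Int)) :
    calculate i j width height img
      = PySem.Int.floordiv
          (((PySem.List.pyRange (max 0 (i - 1)) (min height (i + 2)) 1).map (fun r =>
              ((PySem.List.pyRange (max 0 (j - 1)) (min width (j + 2)) 1).map (fun c =>
                PySem.List.pyGetD (PySem.List.pyGetD img r []) c 0)).sum)).sum)
          (((PySem.List.pyRange (max 0 (i - 1)) (min height (i + 2)) 1).length : Int)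
            * ((PySem.List.pyRange (max 0 (j - 1)) (min width (j + 2)) 1).length : Int)) := by
  unfold calculate
  simp only [pv_pairfold, pv_foldl_pair_add, zero_add]
  have hr : i - 1 + 3 = i + 2 := by ring
  have hc : j - 1 + 3 = j + 2 := by ring
  rw [hr, hc, pv_pyRange_clamp 0 height (i - 1) (i + 2),
      pv_pyRange_clamp 0 width (j - 1) (j + 2)]
  congr 1
  · rw [← pv_sum_map_ite]
    congr 1
    apply List.map_congr_left
    intro r _
    rw [pv_filter_const _ (0 ≤ r) (r < height) (fun c => 0 ≤ c ∧ c < width)]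
    split_ifs with h
    · rfl
    · simp
  · have step : ∀ r : ℤ,
        ((List.filter (fun x => decide (0 ≤ r ∧ r < height ∧ 0 ≤ x ∧ x < width))
            (PySem.List.pyRange (j - 1) (j + 2) 1)).length : ℤ)
          = if 0 ≤ r ∧ r < height then
              ((List.filter (fun x => decide (0 ≤ x ∧ x < width))
                  (PySem.List.pyRange (j - 1) (j + 2) 1)).length : ℤ)
            else 0 := by
      intro r
      rw [pv_filter_const _ (0 ≤ r) (r < height) (fun c => 0 ≤ c ∧ c < width)]
      split_ifs <;> simp
    simp only [step]
    rw [pv_sum_map_ite, pv_sum_map_const]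

-- B reduced to the same closed form, under Pre_
theorem pv_B_closed (i j width height : Int) (img : List (List Int))
    (hpre : Pre_calculate i j width height img) :
    calculate_alt i j width height img
      = PySem.Int.floordiv
          (((PySem.List.pyRange (max 0 (i - 1)) (min height (i + 2)) 1).map (fun r =>
              ((PySem.List.pyRange (max 0 (j - 1)) (min width (j + 2)) 1).map (fun c =>
                PySem.List.pyGetD (PySem.List.pyGetD img r []) c 0)).sum)).sum)
          (((PySem.List.pyRange (max 0 (i - 1)) (min height (i + 2)) 1).length : Int)
            * ((PySem.List.pyRange (max 0 (j - 1)) (min width (j + 2)) 1).length : Int)) := by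
  obtain ⟨hR, hC, hcells⟩ := hpre
  unfold calculate_alt
  rw [PySem.List.enumerate_eq_map_pyRange img [], List.foldl_map]
  simp only [pv_enum_pairfold]
  rw [pv_guard_pair_fold]
  -- the filtered outer index range is exactly the clamped row range
  have hn : min height (i + 2) ≤ PySem.List.len img := by
    have hm : (min height (i + 2) - 1) ∈ PySem.List.pyRange (max 0 (i - 1)) (min height (i + 2)) 1 :=
      PySem.List.mem_pyRange_one.mpr (by omega)
    have := (hcells _ hm).1
    simp only [PySem.List.len]
    omega
  have hrows : (PySem.List.pyRange 0 (PySem.List.len img) 1).filter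
        (fun r => decide (r < height ∧ i - 1 ≤ r ∧ r ≤ i + 1))
      = PySem.List.pyRange (max 0 (i - 1)) (min height (i + 2)) 1 := by
    have h1 := pv_pyRange_clamp (i - 1) (min height (i + 2)) 0 (PySem.List.len img)
    rw [max_comm, min_eq_left hn] at h1
    rw [h1]
    apply List.filter_congr
    intro x _
    simp only [decide_eq_decide]
    omega
  have hcols : ∀ r ∈ PySem.List.pyRange (max 0 (i - 1)) (min height (i + 2)) 1,
      (PySem.List.pyRange 0 (PySem.List.len (PySem.List.pyGetD img r [])) 1).filter
          (fun c => decide (c < width ∧ j - 1 ≤ c ∧ c ≤ j + 1))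
        = PySem.List.pyRange (max 0 (j - 1)) (min width (j + 2)) 1 := by
    intro r hr
    have hlen : min width (j + 2) ≤ PySem.List.len (PySem.List.pyGetD img r []) := by
      have hm : (min width (j + 2) - 1) ∈ PySem.List.pyRange (max 0 (j - 1)) (min width (j + 2)) 1 :=
        PySem.List.mem_pyRange_one.mpr (by omega)
      have := (hcells r hr).2 _ hm
      simp only [PySem.List.len]
      omega
    have h1 := pv_pyRange_clamp (j - 1) (min width (j + 2)) 0
        (PySem.List.len (PySem.List.pyGetD img r []))
    rw [max_comm, min_eq_left hlen] at h1
    rw [h1]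
    apply List.filter_congr
    intro x _
    simp only [decide_eq_decide]
    omega
  rw [hrows]
  dsimp only
  simp only [zero_add]
  congr 1
  · apply congrArg List.sum
    apply List.map_congr_left
    intro r hr
    rw [hcols r hr]
  · have h2 : ((PySem.List.pyRange (max 0 (i - 1)) (min height (i + 2)) 1).map (fun r =>
          (((PySem.List.pyRange 0 (PySem.List.len (PySem.List.pyGetD img r [])) 1).filter
              (fun c => decide (c < width ∧ j - 1 ≤ c ∧ c ≤ j + 1))).length : Int))).sum
        = ((PySem.List.pyRange (max 0 (i - 1)) (min height (i + 2)) 1).map (fun _ =>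
            ((PySem.List.pyRange (max 0 (j - 1)) (min width (j + 2)) 1).length : Int))).sum := by
      apply congrArg List.sum
      apply List.map_congr_left
      intro r hr
      rw [hcols r hr]
    rw [h2, pv_sum_map_const]

-- ===== VERDICT (by name: the statement is the Claim_ definition above) =====
theorem calculate_spec : Claim_equal_calculate := by
  intro i j width height img _ hpre
  unfold Spec_calculate
  rw [pv_A_closed, pv_B_closed i j width height img hpre]
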